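-- pv_equiv track=rewrite | github.com/KoenBron/cryptography | a1.py | most_likely_keylength
-- ===== SOURCE A (Python) =====
-- from math import gcd, ceil
--
-- def most_likely_keylength(substring_positions):
--     distances = []
--     for sequence in substring_positions:
--         positions = substring_positions[sequence]
--         # For each sequence compute the distance between alle elements
--         for i in range(len(positions) - 1):
--             for j in range(i+1, len(positions)):
--                 distances.append(abs(positions[i] - positions[j]))
--
--     # Get the lenght by computing the greatest common divider of all distances
--     keylength = gcd(*distances)
--     return keylength
-- ===== SOURCE B (Python) =====
-- from math import gcd
--
-- def most_likely_keylength(substring_positions):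
--     # Anchor trick: gcd of all pairwise distances equals the gcd of the
--     # differences from the first position of each sequence (one pass, O(n)).
--     g = 0
--     for positions in substring_positions.values():
--         if positions:
--             first = positions[0]
--             for p in positions[1:]:
--                 g = gcd(g, p - first)
--     return g
-- ===== Notes on version B (the rewrite author's own statement) =====
-- stated objective: faster
-- what changed: Instead of materialising the quadratic list of all pairwise distances per sequence and taking gcd of the whole list, B folds gcd incrementally over the differences of each position from the first position of its sequence (gcd of anchor differences equals gcd of all pairwise distances). Pre_ only excludes association lists with duplicate keys, which a Python dict cannot represent.
import Mathlib
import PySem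

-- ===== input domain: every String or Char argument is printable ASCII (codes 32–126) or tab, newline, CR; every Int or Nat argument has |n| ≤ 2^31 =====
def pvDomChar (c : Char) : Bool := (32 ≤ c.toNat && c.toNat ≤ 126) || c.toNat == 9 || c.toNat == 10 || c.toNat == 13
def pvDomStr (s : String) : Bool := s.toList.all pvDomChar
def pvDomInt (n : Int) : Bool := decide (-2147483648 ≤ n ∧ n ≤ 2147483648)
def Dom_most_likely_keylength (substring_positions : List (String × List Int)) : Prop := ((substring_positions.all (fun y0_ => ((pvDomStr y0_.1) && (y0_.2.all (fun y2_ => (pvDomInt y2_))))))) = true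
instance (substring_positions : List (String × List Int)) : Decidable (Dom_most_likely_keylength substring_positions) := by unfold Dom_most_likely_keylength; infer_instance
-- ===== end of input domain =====

-- B replaces A's quadratic list of all pairwise distances by a single incremental
-- gcd fold over the differences from each sequence's first position (objective:
-- faster — it avoids building the quadratic-size distance list).

-- ===== PORT A =====
def most_likely_keylength (substring_positions : List (String × List Int)) : Int :=
  let distances : List Int :=
    substring_positions.foldl (fun acc pair =>
      let positions := PySem.Dict.getD (PySem.Dict.mk substring_positions) pair.1 []
      (PySem.List.pyRange 0 ((positions.length : Int) - 1) 1).foldl (fun acc2 i =>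
        (PySem.List.pyRange (i + 1) (positions.length : Int) 1).foldl (fun acc3 j =>
          acc3 ++ [|PySem.List.pyGetD positions i 0 - PySem.List.pyGetD positions j 0|]) acc2) acc) []
  distances.foldl (fun g x => (Int.gcd g x : Int)) 0

-- ===== PORT B =====
def most_likely_keylength_alt (substring_positions : List (String × List Int)) : Int :=
  substring_positions.foldl (fun g pair =>
    match pair.2 with
    | [] => g
    | first :: rest => rest.foldl (fun g2 p => (Int.gcd g2 (p - first) : Int)) g) 0

-- ===== PRECONDITION & SPEC =====
-- Pre_ excludes association lists with duplicate keys: a Python dict cannot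
-- represent them, so A's first-match lookup there is an accident of the encoding.
def Pre_most_likely_keylength (substring_positions : List (String × List Int)) : Prop :=
  (substring_positions.map Prod.fst).Nodup
instance (substring_positions : List (String × List Int)) : Decidable (Pre_most_likely_keylength substring_positions) := by unfold Pre_most_likely_keylength; infer_instance

def pvWitness_most_likely_keylength : (List (String × List Int)) := [("ab", [0, 4, 10]), ("c", [1, 7])]

def Spec_most_likely_keylength (substring_positions : List (String × List Int)) (out : Int) : Prop := out = most_likely_keylength_alt substring_positions
instance (substring_positions : List (String × List Int)) (out : Int) : Decidable (Spec_most_likely_keylength substring_positions out) := by unfold Spec_most_likely_keylength; infer_instance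

-- ===== CLAIM (what is proved, stated in full; the proofs are below) =====
def Claim_equal_most_likely_keylength : Prop := ∀ (substring_positions : List (String × List Int)), Dom_most_likely_keylength substring_positions → Pre_most_likely_keylength substring_positions → Spec_most_likely_keylength substring_positions (most_likely_keylength substring_positions)

-- ===== LEMMAS AND PROOFS =====

-- Divisibility characterisation of a left gcd-fold.
lemma dvd_foldl_gcd (l : List Int) (a d : Int) :
    d ∣ l.foldl (fun g x => (Int.gcd g x : Int)) a ↔ d ∣ a ∧ ∀ x ∈ l, d ∣ x := by
  induction l generalizing a with
  | nil => simp
  | cons y ys ih =>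
    simp only [List.foldl_cons, ih, Int.dvd_coe_gcd_iff, List.mem_cons]
    constructor
    · rintro ⟨⟨h1, h2⟩, h3⟩
      exact ⟨h1, fun x hx => hx.elim (· ▸ h2) (h3 x)⟩
    · rintro ⟨h1, h2⟩
      exact ⟨⟨h1, h2 y (Or.inl rfl)⟩, fun x hx => h2 x (Or.inr hx)⟩

lemma foldl_gcd_nonneg (l : List Int) (a : Int) (ha : 0 ≤ a) :
    0 ≤ l.foldl (fun g x => (Int.gcd g x : Int)) a := by
  induction l generalizing a with
  | nil => exact ha
  | cons y ys ih => exact ih _ (Int.natCast_nonneg _)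

-- B's inner loop is a gcd-fold over the anchor differences.
lemma alt_inner_eq (first : Int) (rest : List Int) (g : Int) :
    rest.foldl (fun g2 p => (Int.gcd g2 (p - first) : Int)) g
      = (rest.map (· - first)).foldl (fun g x => (Int.gcd g x : Int)) g := by
  rw [List.foldl_map]

def altStep (g : Int) (pair : String × List Int) : Int :=
  match pair.2 with
  | [] => g
  | first :: rest => rest.foldl (fun g2 p => (Int.gcd g2 (p - first) : Int)) g

lemma alt_eq_foldl_altStep (sp : List (String × List Int)) :
    most_likely_keylength_alt sp = sp.foldl altStep 0 := rfl

lemma altStep_nonneg (g : Int) (pair : String × List Int) (hg : 0 ≤ g) : 0 ≤ altStep g pair := by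
  obtain ⟨k, ps⟩ := pair
  unfold altStep
  cases ps with
  | nil => exact hg
  | cons f r =>
    dsimp only
    rw [alt_inner_eq]; exact foldl_gcd_nonneg _ _ hg

lemma alt_nonneg (sp : List (String × List Int)) (a : Int) (ha : 0 ≤ a) :
    0 ≤ sp.foldl altStep a := by
  induction sp generalizing a with
  | nil => exact ha
  | cons p ps ih => exact ih _ (altStep_nonneg _ _ ha)

lemma dvd_altStep (g d : Int) (pair : String × List Int) :
    d ∣ altStep g pair ↔ d ∣ g ∧ ∀ p ∈ pair.2.tail, d ∣ p - pair.2.headI := by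
  obtain ⟨k, ps⟩ := pair
  unfold altStep
  cases ps with
  | nil => simp
  | cons f r =>
    dsimp only
    rw [alt_inner_eq, dvd_foldl_gcd]
    simp

lemma dvd_alt (sp : List (String × List Int)) (a d : Int) :
    d ∣ sp.foldl altStep a ↔ d ∣ a ∧ ∀ pair ∈ sp, ∀ p ∈ pair.2.tail, d ∣ p - pair.2.headI := by
  induction sp generalizing a with
  | nil => simp
  | cons q qs ih =>
    simp only [List.foldl_cons, ih, dvd_altStep, List.mem_cons]
    constructor
    · rintro ⟨⟨h1, h2⟩, h3⟩
      exact ⟨h1, fun pr hpr => hpr.elim (· ▸ h2) (h3 pr)⟩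
    · rintro ⟨h1, h2⟩
      exact ⟨⟨h1, h2 q (Or.inl rfl)⟩, fun pr hpr => h2 pr (Or.inr hpr)⟩

-- A's distances list, per sequence.
def distsOf (ps : List Int) : List Int :=
  (PySem.List.pyRange 0 ((ps.length : Int) - 1) 1).flatMap (fun i =>
    (PySem.List.pyRange (i + 1) (ps.length : Int) 1).map (fun j =>
      |PySem.List.pyGetD ps i 0 - PySem.List.pyGetD ps j 0|))

lemma A_distances_eq (sp : List (String × List Int)) :
    most_likely_keylength sp =
      (sp.flatMap (fun pair => distsOf (PySem.Dict.getD (PySem.Dict.mk sp) pair.1 []))).foldl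
        (fun g x => (Int.gcd g x : Int)) 0 := by
  have h : ∀ (acc : List Int),
      sp.foldl (fun acc pair =>
        let positions := PySem.Dict.getD (PySem.Dict.mk sp) pair.1 []
        (PySem.List.pyRange 0 ((positions.length : Int) - 1) 1).foldl (fun acc2 i =>
          (PySem.List.pyRange (i + 1) (positions.length : Int) 1).foldl (fun acc3 j =>
            acc3 ++ [|PySem.List.pyGetD positions i 0 - PySem.List.pyGetD positions j 0|]) acc2) acc) acc
      = acc ++ sp.flatMap (fun pair => distsOf (PySem.Dict.getD (PySem.Dict.mk sp) pair.1 [])) := by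
    intro acc
    rw [← PySem.List.foldl_append_eq_flatMap]
    apply PySem.List.foldl_congr_mem
    intro acc' pair _
    simp only [distsOf]
    rw [← PySem.List.foldl_append_eq_flatMap]
    apply PySem.List.foldl_congr_mem
    intro acc2 i _
    dsimp only
    rw [PySem.List.foldl_append_singleton_eq_map]
  unfold most_likely_keylength
  exact congrArg (fun l => l.foldl (fun g x => (Int.gcd g x : Int)) 0) ((h []).trans (List.nil_append _))

-- membership in distsOf (Int-indexed form)
lemma mem_distsOf (ps : List Int) (x : Int) :
    x ∈ distsOf ps ↔ ∃ i j : Nat, i < j ∧ j < ps.length ∧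
      x = |PySem.List.pyGetD ps (i : Int) 0 - PySem.List.pyGetD ps (j : Int) 0| := by
  unfold distsOf
  simp only [List.mem_flatMap, List.mem_map, PySem.List.mem_pyRange_one]
  constructor
  · rintro ⟨i, ⟨hi0, hi1⟩, j, ⟨hj0, hj1⟩, rfl⟩
    refine ⟨i.toNat, j.toNat, by omega, by omega, ?_⟩
    rw [show ((i.toNat : Nat) : Int) = i by omega, show ((j.toNat : Nat) : Int) = j by omega]
  · rintro ⟨i, j, hij, hj, rfl⟩
    exact ⟨(i : Int), ⟨by omega, by omega⟩, (j : Int), ⟨by omega, by omega⟩, rfl⟩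

-- per-sequence equivalence of the two divisibility conditions
lemma pairwise_iff_anchor (ps : List Int) (d : Int) :
    (∀ x ∈ distsOf ps, d ∣ x) ↔ (∀ p ∈ ps.tail, d ∣ p - ps.headI) := by
  have hidx : ∀ (k : Nat) (h : k < ps.length), PySem.List.pyGetD ps (k : Int) 0 = ps[k] := by
    intro k h
    rw [PySem.List.pyGetD_natCast, List.getD_eq_getElem ps 0 h]
  constructor
  · intro h p hp
    cases ps with
    | nil => simp at hp
    | cons a l =>
      simp only [List.tail_cons, List.headI_cons] at hp ⊢
      obtain ⟨k, hk, rfl⟩ := List.mem_iff_getElem.mp hp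
      have hk' : k + 1 < (a :: l).length := by simpa using hk
      have h2 := h _ ((mem_distsOf (a :: l) _).mpr ⟨0, k + 1, by omega, hk', rfl⟩)
      rw [dvd_abs, hidx 0 (by omega), hidx (k + 1) hk'] at h2
      simp only [List.getElem_cons_zero, List.getElem_cons_succ] at h2
      exact (dvd_sub_comm).mp h2
  · intro h x hx
    obtain ⟨i, j, hij, hj, rfl⟩ := (mem_distsOf ps x).mp hx
    rw [dvd_abs, hidx i (by omega), hidx j hj]
    cases ps with
    | nil => simp at hj
    | cons a l =>
      have hanchor : ∀ (k : Nat), k < (a :: l).length → d ∣ (a :: l)[k]! - a := by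
        intro k hk
        match k with
        | 0 => simp
        | (m+1) =>
          have hm : m < l.length := by simp at hk; omega
          have h3 := h (l[m]'hm) (by simp)
          simp only [List.headI_cons] at h3
          simpa [List.getElem!_eq_getElem?_getD, List.getElem?_eq_getElem hm] using h3
      have h1 : d ∣ (a :: l)[i]'(by omega) - a := by
        have := hanchor i (by omega)
        rwa [List.getElem!_eq_getElem?_getD, List.getElem?_eq_getElem (by omega : i < (a :: l).length)] at this
      have h2 : d ∣ (a :: l)[j]'hj - a := by
        have := hanchor j hj
        rwa [List.getElem!_eq_getElem?_getD, List.getElem?_eq_getElem hj] at this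
      have h4 := dvd_sub h1 h2
      have h5 : (a :: l)[i]'(by omega) - a - ((a :: l)[j]'hj - a) = (a :: l)[i]'(by omega) - (a :: l)[j]'hj := by ring
      rwa [h5] at h4

-- lookup in the association list under nodup keys
lemma lookup_nodup (sp : List (String × List Int))
    (h : (sp.map Prod.fst).Nodup) (pair : String × List Int) (hm : pair ∈ sp) :
    PySem.Dict.getD (PySem.Dict.mk sp) pair.1 [] = pair.2 := by
  have hk : (PySem.Dict.mk sp).keys.Nodup := by
    simpa [PySem.Dict.keys_mk] using h
  exact PySem.Dict.getD_of_mem_items (PySem.Dict.mk sp) (by simpa using hm) hk []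

-- ===== VERDICT (by name: the statement is the Claim_ definition above) =====
theorem most_likely_keylength_spec : Claim_equal_most_likely_keylength := by
  intro sp _ hpre
  unfold Spec_most_likely_keylength
  rw [A_distances_eq, alt_eq_foldl_altStep]
  have hA : 0 ≤ (sp.flatMap (fun pair => distsOf (PySem.Dict.getD (PySem.Dict.mk sp) pair.1 []))).foldl
      (fun g x => (Int.gcd g x : Int)) 0 := foldl_gcd_nonneg _ _ le_rfl
  have hB : 0 ≤ sp.foldl altStep 0 := alt_nonneg _ _ le_rfl
  have key : ∀ d : Int,
      (d ∣ (sp.flatMap (fun pair => distsOf (PySem.Dict.getD (PySem.Dict.mk sp) pair.1 []))).foldl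
        (fun g x => (Int.gcd g x : Int)) 0) ↔ d ∣ sp.foldl altStep 0 := by
    intro d
    rw [dvd_foldl_gcd, dvd_alt]
    simp only [dvd_zero, true_and, List.mem_flatMap]
    constructor
    · intro h pair hm p hp
      have := pairwise_iff_anchor (PySem.Dict.getD (PySem.Dict.mk sp) pair.1 []) d
      rw [lookup_nodup sp hpre pair hm] at this
      exact this.mp (fun x hx => h x ⟨pair, hm, by rw [lookup_nodup sp hpre pair hm]; exact hx⟩) p hp
    · rintro h x ⟨pair, hm, hx⟩
      rw [lookup_nodup sp hpre pair hm] at hx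
      have := pairwise_iff_anchor pair.2 d
      exact this.mpr (h pair hm) x hx
  exact Int.dvd_antisymm hA hB ((key _).mp dvd_rfl) ((key _).mpr dvd_rfl)
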